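-- pv_equiv track=rewrite | github.com/dimelab/issue_observatory_search | backend/core/search/domain_filter.py | _domain_in_set
-- ===== SOURCE A (Python) =====
-- from typing import List, Optional, Set, Dict
--
-- def _domain_in_set(domain: str, domain_set: Set[str]) -> bool:
--     """Check if domain is in a set of domains."""
--     # Exact match
--     if domain in domain_set:
--         return True
--
--     # TLD match
--     for known_domain in domain_set:
--         if known_domain.startswith("."):
--             # It's a TLD
--             if domain.endswith(known_domain):
--                 return True
--         else:
--             # Check if it's a subdomain
--             if domain.endswith("." + known_domain):
--                 return True
--             # Check exact match
--             if domain == known_domain: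
--                 return True
--
--     return False
-- ===== SOURCE B (Python) =====
-- def _candidates(domain: str):
--     """Domain itself plus, at every dot boundary, the dotted and bare suffix."""
--     cands = [domain]
--     for i in range(len(domain)):
--         if domain[i] == ".":
--             cands.append(domain[i:])
--             cands.append(domain[i + 1:])
--     return cands
--
--
-- def _domain_in_set(domain: str, domain_set) -> bool:
--     """Check if domain is in a set of domains."""
--     return any(c in domain_set for c in _candidates(domain))
-- ===== Notes on version B (the rewrite author's own statement) =====
-- stated objective: alternative
-- what changed: B is a staged generate-then-test algorithm: it first builds the list of suffix candidates of the domain (the domain itself plus, at each dot boundary, the dotted suffix for TLD entries and the bare suffix for parent domains) and then tests each candidate for membership in the set, so the work is independent of the set size; A instead scans every set entry and does suffix comparisons against each.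
import Mathlib
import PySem

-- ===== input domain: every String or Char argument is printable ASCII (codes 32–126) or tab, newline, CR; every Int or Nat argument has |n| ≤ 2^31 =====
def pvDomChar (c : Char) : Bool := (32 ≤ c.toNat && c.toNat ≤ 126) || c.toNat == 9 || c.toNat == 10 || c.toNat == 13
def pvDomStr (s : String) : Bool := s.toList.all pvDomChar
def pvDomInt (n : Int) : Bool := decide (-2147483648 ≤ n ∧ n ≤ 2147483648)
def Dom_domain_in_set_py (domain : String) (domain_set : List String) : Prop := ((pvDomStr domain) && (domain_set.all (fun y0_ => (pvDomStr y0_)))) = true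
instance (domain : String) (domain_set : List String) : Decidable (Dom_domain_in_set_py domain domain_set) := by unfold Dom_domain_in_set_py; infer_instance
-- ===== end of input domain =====

-- B replaces A's scan over the whole domain set by a staged generate-then-test:
-- build the domain's suffix candidates once, then test each for set membership
-- (objective: alternative algorithm whose work is independent of the set size).


-- ===== PORT A =====
-- the `for known_domain in domain_set` loop, returning True on the first match
def pyTldLoop (d : List Char) : List (List Char) → Bool
  | [] => false
  | k :: rest =>
    if PySem.Chars.startswith k ['.'] then
      PySem.Chars.endswith d k || pyTldLoop d rest
    else
      (PySem.Chars.endswith d ('.' :: k) || decide (d = k)) || pyTldLoop d rest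

def domain_in_set_py (domain : String) (domain_set : List String) : Bool :=
  if (domain_set.map String.toList).contains domain.toList then true
  else pyTldLoop domain.toList (domain_set.map String.toList)

-- ===== PORT B =====
-- `_candidates`: the domain itself, plus at every dot boundary the dotted and
-- the bare suffix (the loop over indices becomes recursion on the suffix)
def altCandsAux : List Char → List (List Char)
  | [] => []
  | c :: rest =>
    if c == '.' then (c :: rest) :: rest :: altCandsAux rest
    else altCandsAux rest

def altCands (d : List Char) : List (List Char) := d :: altCandsAux d

def domain_in_set_py_alt (domain : String) (domain_set : List String) : Bool :=
  (altCands domain.toList).any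
    (fun c => (domain_set.map String.toList).contains c)

-- ===== PRECONDITION & SPEC =====
def Spec_domain_in_set_py (domain : String) (domain_set : List String) (out : Bool) : Prop := out = domain_in_set_py_alt domain domain_set
instance (domain : String) (domain_set : List String) (out : Bool) : Decidable (Spec_domain_in_set_py domain domain_set out) := by unfold Spec_domain_in_set_py; infer_instance

-- ===== CLAIM (what is proved, stated in full; the proofs are below) =====
def Claim_equal_domain_in_set_py : Prop := ∀ (domain : String) (domain_set : List String), Dom_domain_in_set_py domain domain_set → Spec_domain_in_set_py domain domain_set (domain_in_set_py domain domain_set)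

-- ===== LEMMAS AND PROOFS =====

-- what A's per-element test means for one set element k
def pyMatch (d k : List Char) : Prop :=
  (['.'] <+: k ∧ k <:+ d) ∨ (¬ ['.'] <+: k ∧ (('.' :: k) <:+ d ∨ d = k))

theorem pyTldLoop_iff (d : List Char) (ks : List (List Char)) :
    pyTldLoop d ks = true ↔ ∃ k ∈ ks, pyMatch d k := by
  induction ks with
  | nil => simp [pyTldLoop]
  | cons k rest ih =>
    by_cases h : PySem.Chars.startswith k ['.'] = true
    · have hp : ['.'] <+: k := (PySem.Chars.startswith_iff k ['.']).mp h
      simp only [pyTldLoop, if_pos h, Bool.or_eq_true, ih, List.mem_cons,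
        PySem.Chars.endswith_iff]
      constructor
      · rintro (h1 | ⟨k', hk', hm⟩)
        · exact ⟨k, Or.inl rfl, Or.inl ⟨hp, h1⟩⟩
        · exact ⟨k', Or.inr hk', hm⟩
      · rintro ⟨k', (rfl | hk'), hm⟩
        · rcases hm with ⟨-, h1⟩ | ⟨hn, -⟩
          · exact Or.inl h1
          · exact absurd hp hn
        · exact Or.inr ⟨k', hk', hm⟩
    · have hp : ¬ ['.'] <+: k := fun hc => h ((PySem.Chars.startswith_iff k ['.']).mpr hc)
      simp only [pyTldLoop, if_neg h, Bool.or_eq_true, ih, List.mem_cons, decide_eq_true_iff,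
        PySem.Chars.endswith_iff]
      constructor
      · rintro ((h1 | h1) | ⟨k', hk', hm⟩)
        · exact ⟨k, Or.inl rfl, Or.inr ⟨hp, Or.inl h1⟩⟩
        · exact ⟨k, Or.inl rfl, Or.inr ⟨hp, Or.inr h1⟩⟩
        · exact ⟨k', Or.inr hk', hm⟩
      · rintro ⟨k', (rfl | hk'), hm⟩
        · rcases hm with ⟨hs, -⟩ | ⟨-, h1⟩
          · exact absurd hs hp
          · exact Or.inl h1
        · exact Or.inr ⟨k', hk', hm⟩

theorem altCandsAux_cons (c : Char) (rest : List Char) :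
    altCandsAux (c :: rest) =
      if c == '.' then (c :: rest) :: rest :: altCandsAux rest
      else altCandsAux rest := rfl

theorem altCandsAux_mem (d t : List Char) :
    t ∈ altCandsAux d ↔ ∃ r, ('.' :: r) <:+ d ∧ (t = '.' :: r ∨ t = r) := by
  induction d with
  | nil =>
    simp only [altCandsAux, List.not_mem_nil, false_iff]
    rintro ⟨r, hr, -⟩
    exact absurd (List.eq_nil_of_suffix_nil hr) (by simp)
  | cons c rest ih =>
    by_cases hc : c = '.'
    · subst hc
      rw [altCandsAux_cons, if_pos (by simp)]
      simp only [List.mem_cons, ih]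
      constructor
      · rintro (rfl | rfl | ⟨r, hr, hm⟩)
        · exact ⟨rest, List.suffix_refl _, Or.inl rfl⟩
        · exact ⟨t, List.suffix_refl _, Or.inr rfl⟩
        · exact ⟨r, hr.trans (List.suffix_cons '.' rest), hm⟩
      · rintro ⟨r, hr, hm⟩
        rcases List.suffix_cons_iff.mp hr with heq | hsuf
        · obtain rfl : r = rest := by injection heq
          tauto
        · exact Or.inr (Or.inr ⟨r, hsuf, hm⟩)
    · rw [altCandsAux_cons, if_neg (by simp [hc]), ih]
      constructor
      · rintro ⟨r, hr, hm⟩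
        exact ⟨r, hr.trans (List.suffix_cons c rest), hm⟩
      · rintro ⟨r, hr, hm⟩
        rcases List.suffix_cons_iff.mp hr with heq | hsuf
        · exact absurd (by injection heq with h _; exact h.symm) hc
        · exact ⟨r, hsuf, hm⟩

theorem altCandsAux_any (ds : List (List Char)) (d : List Char) :
    (altCandsAux d).any (fun c => ds.contains c) = true ↔
      ∃ t, ('.' :: t) <:+ d ∧ (('.' :: t) ∈ ds ∨ t ∈ ds) := by
  simp only [List.any_eq_true, List.contains_iff_mem, altCandsAux_mem]
  constructor
  · rintro ⟨x, ⟨r, hr, rfl | rfl⟩, hx⟩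
    · exact ⟨r, hr, Or.inl hx⟩
    · exact ⟨x, hr, Or.inr hx⟩
  · rintro ⟨t, ht, hm | hm⟩
    · exact ⟨'.' :: t, ⟨t, ht, Or.inl rfl⟩, hm⟩
    · exact ⟨t, ⟨t, ht, Or.inr rfl⟩, hm⟩

theorem loops_agree (d : List Char) (ds : List (List Char)) (hd : d ∉ ds) :
    pyTldLoop d ds = (altCandsAux d).any (fun c => ds.contains c) := by
  rw [Bool.eq_iff_iff, pyTldLoop_iff, altCandsAux_any]
  constructor
  · rintro ⟨k, hk, hm⟩
    rcases hm with ⟨⟨t, rfl⟩, hsuf⟩ | ⟨hns, hsuf | rfl⟩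
    · exact ⟨t, by simpa using hsuf, Or.inl hk⟩
    · exact ⟨k, hsuf, Or.inr hk⟩
    · exact absurd hk hd
  · rintro ⟨t, ht, hm | hm⟩
    · exact ⟨'.' :: t, hm, Or.inl ⟨⟨t, by simp⟩, ht⟩⟩
    · refine ⟨t, hm, ?_⟩
      by_cases hp : ['.'] <+: t
      · exact Or.inl ⟨hp, ((List.suffix_cons '.' t).trans ht)⟩
      · exact Or.inr ⟨hp, Or.inl ht⟩

-- ===== VERDICT (by name: the statement is the Claim_ definition above) =====
theorem domain_in_set_py_spec : Claim_equal_domain_in_set_py := by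
  intro domain domain_set _
  unfold Spec_domain_in_set_py domain_in_set_py domain_in_set_py_alt altCands
  rw [List.any_cons]
  by_cases h : (domain_set.map String.toList).contains domain.toList = true
  · rw [if_pos h, h, Bool.true_or]
  · rw [if_neg h, Bool.eq_false_iff.mpr h, Bool.false_or]
    exact loops_agree _ _ (by simpa [List.contains_iff_mem] using h)
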